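-- pv_equiv track=rewrite | github.com/Dherene/ScriptCreator-and-Gfless | ScriptCreator/test_parser.py | split_lines_ignore_strings
-- ===== SOURCE A (Python) =====
-- def split_lines_ignore_strings(text):
--     lines = []
--     current_line = ""
--     in_string = False
--
--     for char in text:
--         if char == '"' and not in_string:
--             in_string = True
--             current_line += char
--         elif char == '"' and in_string:
--             in_string = False
--             current_line += char
--         elif char == '\n' and in_string:
--             current_line += '0'
--         elif char == '\n' and not in_string:
--             #if not current_line.isspace():
--             lines.append(current_line)
--             current_line = ""
--         else:
--             current_line += char
--
--     return lines
-- ===== SOURCE B (Python) =====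
-- def split_lines_ignore_strings(text):
--     # Transform once (toggle on '"', replace quoted '\n' by '0'), then let str.split cut the lines;
--     # [:-1] drops the final unterminated segment, as A never emits it.
--     out = []
--     in_string = False
--     for ch in text:
--         if ch == '"':
--             in_string = not in_string
--             out.append(ch)
--         elif ch == '\n' and in_string:
--             out.append('0')
--         else:
--             out.append(ch)
--     return ''.join(out).split('\n')[:-1]
-- ===== Notes on version B (the rewrite author's own statement) =====
-- stated objective: simpler
-- what changed: B makes a single transforming pass (toggling the in-string flag on quotes and replacing quoted newlines by '0') and delegates all line-boundary logic to str.split on the newline separator, dropping the last unterminated segment, instead of A's state machine that accumulates and flushes current_line itself.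
import Mathlib
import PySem

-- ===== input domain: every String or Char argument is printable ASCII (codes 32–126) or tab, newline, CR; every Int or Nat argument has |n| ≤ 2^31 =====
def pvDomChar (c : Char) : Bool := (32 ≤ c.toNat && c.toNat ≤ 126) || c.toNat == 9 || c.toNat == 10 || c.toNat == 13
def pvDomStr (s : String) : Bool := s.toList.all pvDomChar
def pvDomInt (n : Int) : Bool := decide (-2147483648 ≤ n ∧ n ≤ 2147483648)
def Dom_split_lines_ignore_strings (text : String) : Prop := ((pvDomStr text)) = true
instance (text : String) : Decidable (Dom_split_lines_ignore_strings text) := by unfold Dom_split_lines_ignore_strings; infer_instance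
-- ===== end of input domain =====

-- B transforms the text in one pass (replacing quoted newlines by '0') and delegates the line
-- cutting to split('\n')[:-1] instead of assembling lines incrementally; objective: simpler.

-- ===== PORT A =====
-- A's loop: state (lines, current_line, in_string); strings kept as List Char, String.ofList at the end.
def aLoop : List Char → List (List Char) → List Char → Bool → List (List Char)
  | [], lines, _cur, _s => lines
  | c :: cs, lines, cur, s =>
    if c = '"' ∧ s = false then aLoop cs lines (cur ++ ['"']) true
    else if c = '"' ∧ s = true then aLoop cs lines (cur ++ ['"']) false
    else if c = '\n' ∧ s = true then aLoop cs lines (cur ++ ['0']) s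
    else if c = '\n' ∧ s = false then aLoop cs (lines ++ [cur]) [] s
    else aLoop cs lines (cur ++ [c]) s

def split_lines_ignore_strings (text : String) : List String :=
  (aLoop text.toList [] [] false).map String.ofList

-- ===== PORT B =====
-- B's transforming pass over the characters, threading in_string.
def bTransform : Bool → List Char → List Char
  | _, [] => []
  | s, c :: cs =>
    if c = '"' then '"' :: bTransform (!s) cs
    else if c = '\n' ∧ s = true then '0' :: bTransform s cs
    else c :: bTransform s cs

def split_lines_ignore_strings_alt (text : String) : List String :=
  (PySem.List.slice (PySem.Chars.splitOn (bTransform false text.toList) ['\n'])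
      none (some (-1))).map String.ofList

-- ===== PRECONDITION & SPEC =====
def Spec_split_lines_ignore_strings (text : String) (out : List String) : Prop := out = split_lines_ignore_strings_alt text
instance (text : String) (out : List String) : Decidable (Spec_split_lines_ignore_strings text out) := by unfold Spec_split_lines_ignore_strings; infer_instance

-- ===== CLAIM (what is proved, stated in full; the proofs are below) =====
def Claim_equal_split_lines_ignore_strings : Prop := ∀ (text : String), Dom_split_lines_ignore_strings text → Spec_split_lines_ignore_strings text (split_lines_ignore_strings text)

-- ===== LEMMAS AND PROOFS =====

-- simple reference split on '\n'
def splitNL : List Char → List (List Char)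
  | [] => [[]]
  | c :: cs => if c = '\n' then [] :: splitNL cs else (splitNL cs).modifyHead (c :: ·)

theorem splitNL_ne_nil (l : List Char) : splitNL l ≠ [] := by
  induction l with
  | nil => simp [splitNL]
  | cons c cs ih =>
    simp only [splitNL]
    split
    · simp
    · cases h : splitNL cs with
      | nil => exact absurd h ih
      | cons hd tl => simp [List.modifyHead]

theorem go_eq_splitNL (fuel : Nat) (l cur : List Char) (acc : List (List Char))
    (h : l.length < fuel) :
    PySem.Chars.splitOn.go ['\n'] fuel l cur acc
      = acc.reverse ++ (splitNL l).modifyHead (cur.reverse ++ ·) := by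
  induction fuel generalizing l cur acc with
  | zero => omega
  | succ f ih =>
    cases l with
    | nil =>
      simp [PySem.Chars.splitOn.go, splitNL]
    | cons c cs =>
      by_cases hc : c = '\n'
      · subst hc
        rw [show PySem.Chars.splitOn.go ['\n'] (f+1) ('\n' :: cs) cur acc
              = PySem.Chars.splitOn.go ['\n'] f cs [] (cur.reverse :: acc) by
              simp [PySem.Chars.splitOn.go, List.isPrefixOf]]
        rw [ih cs [] (cur.reverse :: acc) (by simpa using Nat.lt_of_succ_lt_succ h)]
        cases hs : splitNL cs with
        | nil => exact absurd hs (splitNL_ne_nil cs)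
        | cons hd tl => simp [splitNL, hs, List.modifyHead]
      · rw [show PySem.Chars.splitOn.go ['\n'] (f+1) (c :: cs) cur acc
              = PySem.Chars.splitOn.go ['\n'] f cs (c :: cur) acc by
              simp [PySem.Chars.splitOn.go, List.isPrefixOf, Ne.symm hc]]
        rw [ih cs (c :: cur) acc (by simpa using Nat.lt_of_succ_lt_succ h)]
        simp only [splitNL, if_neg hc]
        cases hs : splitNL cs with
        | nil => exact absurd hs (splitNL_ne_nil cs)
        | cons hd tl => simp [List.modifyHead]

theorem splitOn_eq_splitNL (l : List Char) :
    PySem.Chars.splitOn l ['\n'] = splitNL l := by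
  rw [show PySem.Chars.splitOn l ['\n'] = PySem.Chars.splitOn.go ['\n'] (l.length + 1) l [] [] from rfl]
  rw [go_eq_splitNL (l.length + 1) l [] [] (by omega)]
  cases hs : splitNL l with
  | nil => exact absurd hs (splitNL_ne_nil l)
  | cons hd tl => simp [List.modifyHead]

theorem splitNL_append_no_nl (pre l : List Char) (h : '\n' ∉ pre) :
    splitNL (pre ++ l) = (splitNL l).modifyHead (pre ++ ·) := by
  induction pre with
  | nil =>
    cases hs : splitNL l with
    | nil => exact absurd hs (splitNL_ne_nil l)
    | cons hd tl => simp [hs, List.modifyHead]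
  | cons c cs ih =>
    have hc : c ≠ '\n' := by intro hh; exact h (by simp [hh])
    simp only [List.cons_append, splitNL, if_neg hc, ih (by intro hm; exact h (by simp [hm]))]
    cases hs : splitNL l with
    | nil => exact absurd hs (splitNL_ne_nil l)
    | cons hd tl => simp [List.modifyHead]

theorem splitNL_no_nl (pre : List Char) (h : '\n' ∉ pre) : splitNL pre = [pre] := by
  have := splitNL_append_no_nl pre [] h
  simpa [splitNL, List.modifyHead] using this

theorem aLoop_eq (cs : List Char) (s : Bool) (lines : List (List Char)) (cur : List Char)
    (h : '\n' ∉ cur) :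
    aLoop cs lines cur s = lines ++ (splitNL (cur ++ bTransform s cs)).dropLast := by
  induction cs generalizing s lines cur with
  | nil =>
    simp [aLoop, bTransform, splitNL_no_nl cur h]
  | cons c rest ih =>
    by_cases hq : c = '"'
    · subst hq
      cases s with
      | false =>
        rw [show aLoop ('"' :: rest) lines cur false = aLoop rest lines (cur ++ ['"']) true by
              simp [aLoop]]
        rw [ih true lines (cur ++ ['"']) (by simp [h])]
        simp [bTransform]
      | true =>
        rw [show aLoop ('"' :: rest) lines cur true = aLoop rest lines (cur ++ ['"']) false by
              simp [aLoop]]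
        rw [ih false lines (cur ++ ['"']) (by simp [h])]
        simp [bTransform]
    · by_cases hn : c = '\n'
      · subst hn
        cases s with
        | true =>
          rw [show aLoop ('\n' :: rest) lines cur true = aLoop rest lines (cur ++ ['0']) true by
                simp [aLoop, hq]]
          rw [ih true lines (cur ++ ['0']) (by simp [h])]
          simp [bTransform, hq]
        | false =>
          rw [show aLoop ('\n' :: rest) lines cur false = aLoop rest (lines ++ [cur]) [] false by
                simp [aLoop, hq]]
          rw [ih false (lines ++ [cur]) [] (by simp)]
          rw [show bTransform false ('\n' :: rest) = '\n' :: bTransform false rest by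
                simp [bTransform, hq]]
          rw [splitNL_append_no_nl cur ('\n' :: bTransform false rest) h]
          cases hs : splitNL (bTransform false rest) with
          | nil => exact absurd hs (splitNL_ne_nil _)
          | cons hd tl => simp [splitNL, hs, List.modifyHead]
      · rw [show aLoop (c :: rest) lines cur s = aLoop rest lines (cur ++ [c]) s by
              simp [aLoop, hq, hn]]
        rw [ih s lines (cur ++ [c]) (by simp [h, Ne.symm hn])]
        rw [show bTransform s (c :: rest) = c :: bTransform s rest by
              simp [bTransform, hq, hn]]
        simp

-- ===== VERDICT (by name: the statement is the Claim_ definition above) =====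
theorem split_lines_ignore_strings_spec : Claim_equal_split_lines_ignore_strings := by
  intro text _
  unfold Spec_split_lines_ignore_strings split_lines_ignore_strings split_lines_ignore_strings_alt
  rw [aLoop_eq text.toList false [] [] (by simp)]
  rw [splitOn_eq_splitNL, PySem.List.slice_to_neg_one]
  simp
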